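-- pv_equiv track=rewrite | github.com/VLSiddarth/JPMorgan | src/analytics/sentiment/news_classifier.py | _get_sentiment_hint
-- ===== SOURCE A (Python) =====
-- def _get_sentiment_hint(text: str) -> str:
--     """
--     Get quick sentiment hint (not full analysis)
--
--     Returns: 'positive', 'negative', or 'neutral'
--     """
--     positive_words = {
--         'gain', 'rise', 'growth', 'boost', 'rally', 'surge',
--         'up', 'bullish', 'strong', 'positive', 'optimistic',
--         'recovery', 'expansion', 'improve'
--     }
--
--     negative_words = {
--         'fall', 'drop', 'decline', 'crash', 'loss', 'down',
--         'bearish', 'weak', 'negative', 'pessimistic', 'crisis',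
--         'recession', 'slowdown', 'concern', 'risk'
--     }
--
--     pos_count = sum(1 for word in positive_words if word in text)
--     neg_count = sum(1 for word in negative_words if word in text)
--
--     if pos_count > neg_count + 1:
--         return 'positive'
--     elif neg_count > pos_count + 1:
--         return 'negative'
--     else:
--         return 'neutral'
-- ===== SOURCE B (Python) =====
-- _WEIGHTS = {
--     'gain': 1, 'rise': 1, 'growth': 1, 'boost': 1, 'rally': 1,
--     'surge': 1, 'up': 1, 'bullish': 1, 'strong': 1, 'positive': 1,
--     'optimistic': 1, 'recovery': 1, 'expansion': 1, 'improve': 1,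
--     'fall': -1, 'drop': -1, 'decline': -1, 'crash': -1, 'loss': -1,
--     'down': -1, 'bearish': -1, 'weak': -1, 'negative': -1,
--     'pessimistic': -1, 'crisis': -1, 'recession': -1, 'slowdown': -1,
--     'concern': -1, 'risk': -1,
-- }
--
--
-- def _get_sentiment_hint(text: str) -> str:
--     # Single left-to-right sweep over the text: at each position, mark every
--     # keyword that starts there; then total the weights of the words found.
--     found = set()
--     for i in range(len(text)):
--         for w in _WEIGHTS:
--             if w not in found and text.startswith(w, i):
--                 found.add(w)
--     score = sum(_WEIGHTS[w] for w in found)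
--     if score >= 2:
--         return 'positive'
--     if score <= -2:
--         return 'negative'
--     return 'neutral'
-- ===== Notes on version B (the rewrite author's own statement) =====
-- stated objective: alternative
-- what changed: Replaced the per-word substring-membership counting with a single left-to-right position sweep over the text that marks in a set every keyword starting at each position, then totals the marked words' signed weights from one dict and compares against +/-2.
import Mathlib
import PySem

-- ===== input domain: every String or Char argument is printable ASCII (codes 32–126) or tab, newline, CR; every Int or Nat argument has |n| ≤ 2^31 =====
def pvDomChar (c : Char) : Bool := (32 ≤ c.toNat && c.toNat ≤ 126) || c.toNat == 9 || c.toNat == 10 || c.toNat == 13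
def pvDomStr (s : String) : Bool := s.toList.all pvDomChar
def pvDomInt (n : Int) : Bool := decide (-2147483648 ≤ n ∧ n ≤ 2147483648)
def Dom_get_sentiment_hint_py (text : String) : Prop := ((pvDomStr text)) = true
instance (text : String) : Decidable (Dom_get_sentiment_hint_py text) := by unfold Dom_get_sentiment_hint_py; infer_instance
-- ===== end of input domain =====

-- B replaces A's per-word substring-membership counts with one position sweep
-- over the text collecting the matched words in a set, then a weighted total
-- (same cost; objective: alternative).

-- ===== PORT A =====
def pvPosWords : List String :=
  ["gain", "rise", "growth", "boost", "rally", "surge",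
   "up", "bullish", "strong", "positive", "optimistic",
   "recovery", "expansion", "improve"]

def pvNegWords : List String :=
  ["fall", "drop", "decline", "crash", "loss", "down",
   "bearish", "weak", "negative", "pessimistic", "crisis",
   "recession", "slowdown", "concern", "risk"]

def get_sentiment_hint_py (text : String) : String :=
  let pos_count : Int :=
    pvPosWords.foldl (fun a w => a + (if PySem.Str.isIn w text then 1 else 0)) 0
  let neg_count : Int :=
    pvNegWords.foldl (fun a w => a + (if PySem.Str.isIn w text then 1 else 0)) 0
  if pos_count > neg_count + 1 then "positive"
  else if neg_count > pos_count + 1 then "negative"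
  else "neutral"

-- ===== PORT B =====
def pvWeights : List (String × Int) :=
  [("gain", 1), ("rise", 1), ("growth", 1), ("boost", 1), ("rally", 1),
   ("surge", 1), ("up", 1), ("bullish", 1), ("strong", 1), ("positive", 1),
   ("optimistic", 1), ("recovery", 1), ("expansion", 1), ("improve", 1),
   ("fall", -1), ("drop", -1), ("decline", -1), ("crash", -1), ("loss", -1),
   ("down", -1), ("bearish", -1), ("weak", -1), ("negative", -1),
   ("pessimistic", -1), ("crisis", -1), ("recession", -1), ("slowdown", -1),
   ("concern", -1), ("risk", -1)]

def pvWeightsDict : PySem.Dict String Int := PySem.Dict.ofList pvWeights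

-- text.startswith(w, i): for the 0 ≤ i < len(text) produced by range(len(text)),
-- Python's startswith with a start offset is exactly a prefix test on the drop —
-- ported as PySem.Chars.startswith on (text.toList.drop i.toNat).
def get_sentiment_hint_py_alt (text : String) : String :=
  let found : PySem.Set String :=
    (PySem.List.pyRange 0 (text.toList.length : Int) 1).foldl
      (fun fnd i =>
        pvWeights.foldl
          (fun fnd p =>
            if !(PySem.Set.contains fnd p.1)
               && PySem.Chars.startswith (text.toList.drop i.toNat) p.1.toList
            then PySem.Set.add fnd p.1 else fnd)
          fnd)
      PySem.Set.empty
  let score : Int := found.foldl (fun a w => a + pvWeightsDict.getD w 0) 0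
  if score ≥ 2 then "positive"
  else if score ≤ -2 then "negative"
  else "neutral"

-- ===== PRECONDITION & SPEC =====
def Spec_get_sentiment_hint_py (text : String) (out : String) : Prop := out = get_sentiment_hint_py_alt text
instance (text : String) (out : String) : Decidable (Spec_get_sentiment_hint_py text out) := by unfold Spec_get_sentiment_hint_py; infer_instance

-- ===== CLAIM (what is proved, stated in full; the proofs are below) =====
def Claim_equal_get_sentiment_hint_py : Prop := ∀ (text : String), Dom_get_sentiment_hint_py text → Spec_get_sentiment_hint_py text (get_sentiment_hint_py text)

-- ===== LEMMAS AND PROOFS =====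

-- membership after the inner loop over the word list at one position
theorem pv_inner_mem (cs : List Char) (i : Nat) (W : List (String × Int))
    (fnd : PySem.Set String) (w : String) :
    w ∈ W.foldl
        (fun fnd p =>
          if !(PySem.Set.contains fnd p.1)
             && PySem.Chars.startswith (cs.drop i) p.1.toList
          then PySem.Set.add fnd p.1 else fnd) fnd
      ↔ w ∈ fnd ∨ (w ∈ W.map Prod.fst
          ∧ PySem.Chars.startswith (cs.drop i) w.toList = true) := by
  induction W generalizing fnd with
  | nil => simp
  | cons p ps ih =>
    rw [List.foldl_cons, ih]
    have hmem : w ∈ (if !(PySem.Set.contains fnd p.1)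
           && PySem.Chars.startswith (cs.drop i) p.1.toList
        then PySem.Set.add fnd p.1 else fnd)
        ↔ w ∈ fnd ∨ (w = p.1
            ∧ PySem.Chars.startswith (cs.drop i) p.1.toList = true) := by
      by_cases hs : PySem.Chars.startswith (cs.drop i) p.1.toList = true
      · by_cases hc : PySem.Set.contains fnd p.1 = true
        · have hm : p.1 ∈ fnd := (PySem.Set.contains_iff fnd p.1).mp hc
          simp only [hc, hs, Bool.not_true, Bool.false_and, Bool.false_eq_true, if_false]
          constructor
          · exact Or.inl
          · rintro (h | ⟨rfl, _⟩) <;> [exact h; exact hm]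
        · simp only [hc, hs, Bool.not_false, Bool.true_and, if_true, PySem.Set.mem_add]
          tauto
      · simp only [hs, Bool.and_false, Bool.false_eq_true, if_false]
        tauto
    rw [hmem]
    constructor
    · rintro ((h | ⟨rfl, hs⟩) | ⟨hn, hs⟩)
      · exact Or.inl h
      · exact Or.inr ⟨by simp, hs⟩
      · exact Or.inr ⟨by simp only [List.map_cons, List.mem_cons]; exact Or.inr hn, hs⟩
    · rintro (h | ⟨hn, hs⟩)
      · exact Or.inl (Or.inl h)
      · rw [List.map_cons, List.mem_cons] at hn
        rcases hn with rfl | hn'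
        · exact Or.inl (Or.inr ⟨rfl, hs⟩)
        · exact Or.inr ⟨hn', hs⟩

-- nodup is preserved by the inner loop
theorem pv_inner_nodup (cs : List Char) (i : Nat) (W : List (String × Int))
    (fnd : PySem.Set String) (h : fnd.Nodup) :
    (W.foldl
        (fun fnd p =>
          if !(PySem.Set.contains fnd p.1)
             && PySem.Chars.startswith (cs.drop i) p.1.toList
          then PySem.Set.add fnd p.1 else fnd) fnd).Nodup := by
  induction W generalizing fnd with
  | nil => exact h
  | cons p ps ih =>
    rw [List.foldl_cons]
    apply ih
    split
    · rw [PySem.Set.add_eq_ite]; split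
      · exact h
      · rename_i hx
        exact List.Nodup.append h (List.nodup_singleton _) (List.disjoint_singleton.mpr hx)
    · exact h

-- membership after the outer position sweep
theorem pv_outer_mem (cs : List Char) (I : List Int)
    (fnd : PySem.Set String) (w : String) :
    w ∈ I.foldl
        (fun fnd i =>
          pvWeights.foldl
            (fun fnd p =>
              if !(PySem.Set.contains fnd p.1)
                 && PySem.Chars.startswith (cs.drop i.toNat) p.1.toList
              then PySem.Set.add fnd p.1 else fnd) fnd) fnd
      ↔ w ∈ fnd ∨ (w ∈ pvWeights.map Prod.fst
          ∧ ∃ i ∈ I, PySem.Chars.startswith (cs.drop i.toNat) w.toList = true) := by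
  induction I generalizing fnd with
  | nil => simp
  | cons i0 is ih =>
    rw [List.foldl_cons, ih, pv_inner_mem]
    constructor
    · rintro ((h | ⟨hn, hs⟩) | ⟨hn, i, hi, hs⟩)
      · exact Or.inl h
      · exact Or.inr ⟨hn, i0, List.mem_cons_self .., hs⟩
      · exact Or.inr ⟨hn, i, List.mem_cons_of_mem _ hi, hs⟩
    · rintro (h | ⟨hn, i, hi, hs⟩)
      · exact Or.inl (Or.inl h)
      · rcases List.mem_cons.mp hi with rfl | hi
        · exact Or.inl (Or.inr ⟨hn, hs⟩)
        · exact Or.inr ⟨hn, i, hi, hs⟩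

theorem pv_outer_nodup (cs : List Char) (I : List Int)
    (fnd : PySem.Set String) (h : fnd.Nodup) :
    (I.foldl
        (fun fnd i =>
          pvWeights.foldl
            (fun fnd p =>
              if !(PySem.Set.contains fnd p.1)
                 && PySem.Chars.startswith (cs.drop i.toNat) p.1.toList
              then PySem.Set.add fnd p.1 else fnd) fnd) fnd).Nodup := by
  induction I generalizing fnd with
  | nil => exact h
  | cons i0 is ih =>
    rw [List.foldl_cons]
    exact ih _ (pv_inner_nodup cs i0.toNat pvWeights fnd h)

-- a bounded position sweep finds w exactly when w is a substring (w nonempty)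
theorem pv_sweep_iff_isIn (cs : List Char) (w : String) (hw : w.toList ≠ []) :
    (∃ i ∈ PySem.List.pyRange 0 (cs.length : Int) 1,
        PySem.Chars.startswith (cs.drop i.toNat) w.toList = true)
      ↔ PySem.Chars.isIn w.toList cs = true := by
  rw [← PySem.Chars.exists_prefix_drop_iff_isIn]
  constructor
  · rintro ⟨i, hi, hs⟩
    exact ⟨i.toNat, (PySem.Chars.startswith_iff _ _).mp hs⟩
  · rintro ⟨j, hj⟩
    have hjlt : j < cs.length := by
      by_contra hge
      rw [List.drop_eq_nil_of_le (by omega)] at hj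
      exact hw (List.prefix_nil.mp hj)
    refine ⟨(j : Int), ?_, ?_⟩
    · rw [PySem.List.mem_pyRange_one]
      constructor <;> [positivity; exact_mod_cast hjlt]
    · rw [Int.toNat_natCast]
      exact (PySem.Chars.startswith_iff _ _).mpr hj

-- every keyword is nonempty
theorem pv_words_nonempty : ∀ w ∈ pvWeights.map Prod.fst, w.toList ≠ [] := by decide

-- fold-sum as a mapped sum
theorem pv_foldl_sum (f : String → Int) (l : List String) (c : Int) :
    l.foldl (fun a w => a + f w) c = c + (l.map f).sum := by
  induction l generalizing c with
  | nil => simp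
  | cons x xs ih => rw [List.foldl_cons, ih]; simp; ring

-- A's counting fold is countP
theorem pv_count_eq (q : String → Bool) (l : List String) :
    l.foldl (fun a w => a + (if q w then (1 : Int) else 0)) 0 = l.countP q := by
  rw [pv_foldl_sum, zero_add]
  induction l with
  | nil => simp
  | cons x xs ih =>
    rw [List.map_cons, List.sum_cons, ih, List.countP_cons]
    split <;> (push_cast; omega)

-- sum of a constant weight over a filter is the count
theorem pv_sum_filter_const (f : String → Int) (p : String → Bool) (c : Int)
    (l : List String) (h : ∀ w ∈ l, f w = c) :
    ((l.filter p).map f).sum = c * (l.countP p : Int) := by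
  induction l with
  | nil => simp
  | cons x xs ih =>
    have hx := h x (List.mem_cons_self ..)
    have ih' := ih (fun w hw => h w (List.mem_cons_of_mem _ hw))
    rw [List.filter_cons, List.countP_cons]
    split <;> simp_all
    ring

theorem pv_names_nodup : (pvWeights.map Prod.fst).Nodup := by decide

theorem pv_pos_weight : ∀ w ∈ pvPosWords, pvWeightsDict.getD w 0 = 1 := by decide

theorem pv_neg_weight : ∀ w ∈ pvNegWords, pvWeightsDict.getD w 0 = -1 := by decide

theorem pv_names_split : pvWeights.map Prod.fst = pvPosWords ++ pvNegWords := by decide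

-- B's score (the weighted total over the sweep's found set) equals A's
-- positive count minus A's negative count
theorem pv_found_spec (cs : List Char) (F : PySem.Set String)
    (hF : F = (PySem.List.pyRange 0 (cs.length : Int) 1).foldl
        (fun fnd i =>
          pvWeights.foldl
            (fun fnd p =>
              if !(PySem.Set.contains fnd p.1)
                 && PySem.Chars.startswith (cs.drop i.toNat) p.1.toList
              then PySem.Set.add fnd p.1 else fnd) fnd)
        PySem.Set.empty) :
    F.foldl (fun a w => a + pvWeightsDict.getD w 0) 0
      = (pvPosWords.countP (fun w => PySem.Chars.isIn w.toList cs) : Int)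
        - (pvNegWords.countP (fun w => PySem.Chars.isIn w.toList cs) : Int) := by
  have hmem : ∀ w, w ∈ F ↔ w ∈ (pvWeights.map Prod.fst).filter
      (fun w => PySem.Chars.isIn w.toList cs) := by
    intro w
    rw [hF, pv_outer_mem, List.mem_filter]
    constructor
    · rintro (h | ⟨hn, hs⟩)
      · exact absurd h List.not_mem_nil
      · exact ⟨hn, (pv_sweep_iff_isIn cs w (pv_words_nonempty w hn)).mp hs⟩
    · rintro ⟨hn, hs⟩
      exact Or.inr ⟨hn, (pv_sweep_iff_isIn cs w (pv_words_nonempty w hn)).mpr hs⟩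
  have hnd : F.Nodup := by
    rw [hF]; exact pv_outer_nodup cs _ _ List.nodup_nil
  have hperm : F.Perm ((pvWeights.map Prod.fst).filter
      (fun w => PySem.Chars.isIn w.toList cs)) :=
    (List.perm_ext_iff_of_nodup hnd (List.Nodup.filter _ pv_names_nodup)).mpr hmem
  have hsum := List.Perm.sum_eq (List.Perm.map (fun w => pvWeightsDict.getD w 0) hperm)
  rw [pv_foldl_sum, zero_add, hsum, pv_names_split, List.filter_append, List.map_append,
    List.sum_append, pv_sum_filter_const _ _ 1 _ pv_pos_weight,
    pv_sum_filter_const _ _ (-1) _ pv_neg_weight]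
  ring

-- ===== VERDICT =====
theorem get_sentiment_hint_py_spec : Claim_equal_get_sentiment_hint_py := by
  intro text _
  unfold Spec_get_sentiment_hint_py get_sentiment_hint_py get_sentiment_hint_py_alt
  dsimp only
  rw [pv_found_spec text.toList _ rfl,
    pv_count_eq (fun w => PySem.Str.isIn w text) pvPosWords,
    pv_count_eq (fun w => PySem.Str.isIn w text) pvNegWords]
  simp only [PySem.Str.isIn_eq]
  set P := pvPosWords.countP (fun w => PySem.Chars.isIn w.toList text.toList)
  set N := pvNegWords.countP (fun w => PySem.Chars.isIn w.toList text.toList)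
  split_ifs <;> first | rfl | omega
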